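-- pv_equiv track=rewrite | github.com/ShenoudaMikhael/alx-backend | 0x01-caching/3-lru_cache.py | get_lru_item
-- ===== SOURCE A (Python) =====
-- def get_lru_item(usage_list):
--     """get_lru_item"""
--     seen = set()
--     lru_item = None
--
--     # Traverse the list in reverse order
--     for item in reversed(usage_list):
--         if item not in seen:
--             seen.add(item)
--             lru_item = item
--
--     return lru_item
-- ===== SOURCE B (Python) =====
-- def get_lru_item(usage_list):
--     """get_lru_item: count occurrences, then return the first item whose
--     occurrences are exhausted (i.e. whose last occurrence is earliest)."""
--     remaining = {}
--     for item in usage_list: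
--         remaining[item] = remaining.get(item, 0) + 1
--     for item in usage_list:
--         remaining[item] -= 1
--         if remaining[item] == 0:
--             return item
--     return None
-- ===== Notes on version B (the rewrite author's own statement) =====
-- stated objective: alternative
-- what changed: Instead of a reverse pass maintaining a seen-set and overwriting a candidate, B counts occurrences in one forward pass and then scans forward, returning the first item whose remaining count drops to zero (its last occurrence); B can stop early where A always scans the whole list.
import Mathlib
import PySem

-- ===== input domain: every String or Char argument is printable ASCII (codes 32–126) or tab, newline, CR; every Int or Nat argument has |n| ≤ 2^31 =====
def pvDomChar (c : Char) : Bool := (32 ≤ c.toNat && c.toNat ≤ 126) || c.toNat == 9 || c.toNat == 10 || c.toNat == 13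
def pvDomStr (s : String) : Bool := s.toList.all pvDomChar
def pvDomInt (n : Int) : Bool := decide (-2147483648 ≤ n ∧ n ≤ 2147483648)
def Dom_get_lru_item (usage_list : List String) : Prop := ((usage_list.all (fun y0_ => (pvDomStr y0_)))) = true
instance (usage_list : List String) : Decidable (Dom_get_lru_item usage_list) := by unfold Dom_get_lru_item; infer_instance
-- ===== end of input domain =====

-- B replaces A's reverse pass with seen-set tracking by a counting pass followed by a
-- forward scan that returns the first item whose occurrences are exhausted (objective: alternative).

-- ===== PORT A =====
-- loop state: (seen, lru_item); traversal over reversed(usage_list)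
def pvStepA (st : PySem.Set String × Option String) (item : String) :
    PySem.Set String × Option String :=
  if !(PySem.Set.contains st.1 item) then (PySem.Set.add st.1 item, some item) else st

def get_lru_item (usage_list : List String) : Option String :=
  (usage_list.reverse.foldl pvStepA (PySem.Set.empty, none)).2

-- ===== PORT B =====
-- first loop: remaining[item] = remaining.get(item, 0) + 1
def pvCount (usage_list : List String) : PySem.Dict String Int :=
  usage_list.foldl (fun d item => PySem.Dict.insert d item (PySem.Dict.getD d item 0 + 1))
    PySem.Dict.empty

-- second loop with early return, as structural recursion over the list
def pvSelect (remaining : PySem.Dict String Int) (usage_list : List String) : Option String :=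
  match usage_list with
  | [] => none
  | item :: rest =>
    let remaining' := PySem.Dict.insert remaining item (PySem.Dict.getD remaining item 0 - 1)
    if PySem.Dict.getD remaining' item 0 == 0 then some item else pvSelect remaining' rest

def get_lru_item_alt (usage_list : List String) : Option String :=
  pvSelect (pvCount usage_list) usage_list

-- ===== PRECONDITION & SPEC =====
def Spec_get_lru_item (usage_list : List String) (out : Option String) : Prop := out = get_lru_item_alt usage_list
instance (usage_list : List String) (out : Option String) : Decidable (Spec_get_lru_item usage_list out) := by unfold Spec_get_lru_item; infer_instance

-- ===== CLAIM (what is proved, stated in full; the proofs are below) =====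
def Claim_equal_get_lru_item : Prop := ∀ (usage_list : List String), Dom_get_lru_item usage_list → Spec_get_lru_item usage_list (get_lru_item usage_list)

-- ===== LEMMAS AND PROOFS =====

-- common characterisation both ports are reduced to
def pvRec (l : List String) : Option String :=
  match l with
  | [] => none
  | x :: xs => if x ∈ xs then pvRec xs else some x

-- membership in the seen-set accumulated by A's fold
lemma pv_seen_mem (r : List String) (st : PySem.Set String × Option String) (x : String) :
    x ∈ (r.foldl pvStepA st).1 ↔ x ∈ st.1 ∨ x ∈ r := by
  induction r generalizing st with
  | nil => simp
  | cons y ys ih =>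
    rw [List.foldl_cons, ih]
    unfold pvStepA
    split_ifs with h
    · show x ∈ PySem.Set.add st.1 y ∨ x ∈ ys ↔ _
      rw [PySem.Set.mem_add]
      simp only [List.mem_cons]
      tauto
    · have hy : y ∈ st.1 := by
        rw [← PySem.Set.contains_iff]
        simpa using h
      simp only [List.mem_cons]
      constructor
      · tauto
      · rintro (h1 | h2 | h3)
        · exact Or.inl h1
        · exact Or.inl (h2 ▸ hy)
        · exact Or.inr h3

lemma pv_unfold_cons (x : String) (xs : List String) :
    get_lru_item (x :: xs) =
      if x ∈ xs then get_lru_item xs else some x := by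
  show (((x :: xs).reverse).foldl pvStepA (PySem.Set.empty, none)).2 = _
  rw [List.reverse_cons, List.foldl_append, List.foldl_cons, List.foldl_nil]
  have hm : x ∈ (xs.reverse.foldl pvStepA (PySem.Set.empty, none)).1 ↔ x ∈ xs := by
    rw [pv_seen_mem]; simp [PySem.Set.empty]
  rw [pvStepA]
  by_cases h : x ∈ xs
  · rw [if_pos h, if_neg]
    · rfl
    · have hc : PySem.Set.contains (xs.reverse.foldl pvStepA (PySem.Set.empty, none)).1 x = true :=
        (PySem.Set.contains_iff _ _).mpr (hm.mpr h)
      rw [hc]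
      exact fun hcon => Bool.false_ne_true (by simp at hcon)
  · rw [if_neg h, if_pos]
    have hc : PySem.Set.contains (xs.reverse.foldl pvStepA (PySem.Set.empty, none)).1 x = false := by
      rw [← Bool.not_eq_true, PySem.Set.contains_iff]
      exact fun hx => h (hm.mp hx)
    rw [hc]
    rfl

lemma pv_a_eq_rec (l : List String) : get_lru_item l = pvRec l := by
  induction l with
  | nil => rfl
  | cons x xs ih => rw [pv_unfold_cons, pvRec, ih]

lemma pv_select_eq_rec (l : List String) (d : PySem.Dict String Int)
    (hd : ∀ y, PySem.Dict.getD d y 0 = (l.count y : Int)) :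
    pvSelect d l = pvRec l := by
  induction l generalizing d with
  | nil => rfl
  | cons x xs ih =>
    rw [pvSelect, pvRec]
    have hx : PySem.Dict.getD (PySem.Dict.insert d x (PySem.Dict.getD d x 0 - 1)) x 0 =
        (xs.count x : Int) := by
      rw [PySem.Dict.getD_insert, if_pos rfl, hd x, List.count_cons]
      push_cast
      simp
    by_cases h : x ∈ xs
    · have hne : ((xs.count x : Int) == 0) = false := by
        have := List.count_pos_iff.mpr h
        simp only [beq_eq_false_iff_ne, ne_eq]
        omega
      rw [hx, hne, if_neg (by simp), if_pos h]
      exact ih _ (fun y => by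
        rw [PySem.Dict.getD_insert]
        by_cases hyx : y = x
        · rw [if_pos hyx, hyx, hd x, List.count_cons]
          push_cast
          simp
        · rw [if_neg hyx, hd y, List.count_cons]
          push_cast
          simp
          exact fun hxy => hyx hxy.symm)
    · have hz : ((xs.count x : Int) == 0) = true := by
        simp [List.count_eq_zero_of_not_mem h]
      rw [hx, hz, if_pos rfl, if_neg h]

lemma pv_b_eq_rec (l : List String) : get_lru_item_alt l = pvRec l := by
  refine pv_select_eq_rec l (pvCount l) (fun y => ?_)
  show PySem.Dict.getD
      (l.foldl (fun d item => PySem.Dict.insert d item (PySem.Dict.getD d item 0 + 1))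
        PySem.Dict.empty) y 0 = _
  rw [PySem.Dict.getD_foldl_insert_add_one]
  simp [PySem.Dict.empty, PySem.Dict.getD, PySem.Dict.get?]

-- ===== VERDICT (by name: the statement is the Claim_ definition above) =====
theorem get_lru_item_spec : Claim_equal_get_lru_item := by
  intro usage_list _
  unfold Spec_get_lru_item
  rw [pv_a_eq_rec, pv_b_eq_rec]
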